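-- pv_equiv track=rewrite | github.com/gitee2github/pkgship | packageship_panel/packageship_panel/application/sendmail/sendmail.py | _get_maintainers
-- ===== SOURCE A (Python) =====
-- def _get_maintainers(res_repo_dict, key, email_receivers):
--     '''
--     Obtain maintainier mailbox information, including string data output to emails and CSV files
--     '''
--     maintainers_ids = ""
--     csv_maintainers = ""
--     m_count = 0  # set the totall count of maintainer/contributors
--     for res_maintainer in res_repo_dict.get(key, []):
--         if res_maintainer.get("id") and m_count < 3:
--             m_count += 1
--             maintainers_ids = (
--                 f"{maintainers_ids}<b>id:</b>{str(res_maintainer['id'])}    <b>email:</b>{str(res_maintainer['email'])}<br>"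
--             )
--         if res_maintainer.get("id"):
--             csv_maintainers = f"{csv_maintainers}id:{str(res_maintainer['id'])}    email:{str(res_maintainer['email'])}\n"
--         if res_maintainer.get("email"):
--             email_receivers.append(res_maintainer["email"])
--     return maintainers_ids, csv_maintainers
-- ===== SOURCE B (Python) =====
-- def _get_maintainers(res_repo_dict, key, email_receivers):
--     '''
--     Obtain maintainier mailbox information, including string data output to emails and CSV files
--     '''
--     def rec(ms, quota):
--         # builds both strings back-to-front: head fragments are prepended to the tail's result
--         if not ms:
--             return "", ""
--         m = ms[0]
--         if m.get("email"):
--             email_receivers.append(m["email"])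
--         if not m.get("id"):
--             return rec(ms[1:], quota)
--         tail_mail, tail_csv = rec(ms[1:], quota - 1 if quota > 0 else 0)
--         head_mail = f"<b>id:</b>{str(m['id'])}    <b>email:</b>{str(m['email'])}<br>" if quota > 0 else ""
--         return head_mail + tail_mail, f"id:{str(m['id'])}    email:{str(m['email'])}\n" + tail_csv
--
--     return rec(res_repo_dict.get(key, []), 3)
-- ===== Notes on version B (the rewrite author's own statement) =====
-- stated objective: alternative
-- what changed: Replaces A's single forward loop with mutable string accumulators and a count-up counter by a structural recursion over the maintainer list that builds both strings back-to-front (head fragments prepended to the tail's result) while passing down a countdown quota of 3 for the email string.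
import Mathlib
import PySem

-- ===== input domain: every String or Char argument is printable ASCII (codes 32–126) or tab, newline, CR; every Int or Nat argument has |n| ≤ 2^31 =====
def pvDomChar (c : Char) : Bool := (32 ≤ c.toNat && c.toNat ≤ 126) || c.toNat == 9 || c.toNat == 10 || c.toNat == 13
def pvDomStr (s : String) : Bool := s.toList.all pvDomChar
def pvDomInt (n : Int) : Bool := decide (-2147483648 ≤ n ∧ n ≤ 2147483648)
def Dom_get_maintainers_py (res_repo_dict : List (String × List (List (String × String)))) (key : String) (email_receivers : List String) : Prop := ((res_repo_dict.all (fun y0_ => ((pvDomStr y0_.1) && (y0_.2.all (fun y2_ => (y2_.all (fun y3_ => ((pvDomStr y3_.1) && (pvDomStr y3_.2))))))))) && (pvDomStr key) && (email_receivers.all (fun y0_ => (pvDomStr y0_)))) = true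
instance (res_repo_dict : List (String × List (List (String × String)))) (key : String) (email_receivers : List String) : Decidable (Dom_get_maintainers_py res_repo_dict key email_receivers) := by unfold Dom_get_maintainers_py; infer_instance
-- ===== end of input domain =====

-- B replaces A's accumulator loop by a structural recursion building the strings back-to-front with a
-- countdown quota; equivalence is about the RETURN value only: both Pythons extend the email_receivers
-- argument in place with the same elements in the same order.

-- ===== PORT A =====
-- m.get(k) truthiness: key present (first match) with a non-empty string value
def pvTruthy (m : List (String × String)) (k : String) : Bool := ((List.lookup k m).getD "") != ""
-- m['id'] / m['email']: only evaluated where Pre_ guarantees the key is present (else Python raises KeyError)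
def pvIdOf (m : List (String × String)) : String := (List.lookup "id" m).getD ""
def pvEmailOf (m : List (String × String)) : String := (List.lookup "email" m).getD ""

-- the loop body of A: state = (maintainers_ids, csv_maintainers, m_count); the
-- 'if res_maintainer.get("email"): email_receivers.append(...)' branch only mutates the argument
-- (a side effect, not part of the return value) and is therefore not modelled.
def pvLoopA : List (List (String × String)) → String → String → Nat → String × String
  | [], mi, csv, _ => (mi, csv)
  | m :: rest, mi, csv, c =>
    let mi' := if pvTruthy m "id" && decide (c < 3) then
        mi ++ "<b>id:</b>" ++ pvIdOf m ++ "    <b>email:</b>" ++ pvEmailOf m ++ "<br>" else mi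
    let c' := if pvTruthy m "id" && decide (c < 3) then c + 1 else c
    let csv' := if pvTruthy m "id" then
        csv ++ "id:" ++ pvIdOf m ++ "    email:" ++ pvEmailOf m ++ "\n" else csv
    pvLoopA rest mi' csv' c'

def get_maintainers_py (res_repo_dict : List (String × List (List (String × String)))) (key : String) (email_receivers : List String) : String × String :=
  pvLoopA ((List.lookup key res_repo_dict).getD []) "" "" 0

-- ===== PORT B =====
-- Source B's rec: structural recursion, head fragments PREPENDED to the tail's result, quota counts down
-- (the email_receivers.append side effect is not part of the return value and is not modelled)
def pvRecB : List (List (String × String)) → Nat → String × String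
  | [], _ => ("", "")
  | m :: rest, quota =>
    if !(pvTruthy m "id") then pvRecB rest quota
    else
      let t := pvRecB rest (if 0 < quota then quota - 1 else 0)
      let headMail := if 0 < quota then
          "<b>id:</b>" ++ pvIdOf m ++ "    <b>email:</b>" ++ pvEmailOf m ++ "<br>" else ""
      (headMail ++ t.1, "id:" ++ pvIdOf m ++ "    email:" ++ pvEmailOf m ++ "\n" ++ t.2)

def get_maintainers_py_alt (res_repo_dict : List (String × List (List (String × String)))) (key : String) (email_receivers : List String) : String × String :=
  pvRecB ((List.lookup key res_repo_dict).getD []) 3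

-- ===== PRECONDITION & SPEC =====
-- Pre_ excludes exactly the inputs where an id-bearing maintainer has no 'email' key: there Python A
-- (and Python B alike) raises KeyError on m['email'].
def Pre_get_maintainers_py (res_repo_dict : List (String × List (List (String × String)))) (key : String) (email_receivers : List String) : Prop :=
  ∀ m ∈ (List.lookup key res_repo_dict).getD [], pvTruthy m "id" = true → (List.lookup "email" m).isSome = true
instance (res_repo_dict : List (String × List (List (String × String)))) (key : String) (email_receivers : List String) : Decidable (Pre_get_maintainers_py res_repo_dict key email_receivers) := by unfold Pre_get_maintainers_py; infer_instance

def pvWitness_get_maintainers_py : (List (String × List (List (String × String)))) × String × List String :=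
  ([("pkg", [[("id", "u1"), ("email", "u1@x.org")], [("email", "noid@x.org")], [("id", "u2"), ("email", "u2@x.org")]])], "pkg", ["boss@x.org"])

def Spec_get_maintainers_py (res_repo_dict : List (String × List (List (String × String)))) (key : String) (email_receivers : List String) (out : String × String) : Prop := out = get_maintainers_py_alt res_repo_dict key email_receivers
instance (res_repo_dict : List (String × List (List (String × String)))) (key : String) (email_receivers : List String) (out : String × String) : Decidable (Spec_get_maintainers_py res_repo_dict key email_receivers out) := by unfold Spec_get_maintainers_py; infer_instance

-- ===== CLAIM =====
def Claim_equal_get_maintainers_py : Prop := ∀ (res_repo_dict : List (String × List (List (String × String)))) (key : String) (email_receivers : List String), Dom_get_maintainers_py res_repo_dict key email_receivers → Pre_get_maintainers_py res_repo_dict key email_receivers → Spec_get_maintainers_py res_repo_dict key email_receivers (get_maintainers_py res_repo_dict key email_receivers)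

-- ===== LEMMAS AND PROOFS =====

-- loop/recursion correspondence: A's accumulating loop with count c equals the accumulators
-- prepended to B's back-to-front recursion with remaining quota 3 - c
theorem pvLoopA_eq_recB (lst : List (List (String × String))) (mi csv : String) (c : Nat) :
    pvLoopA lst mi csv c = (mi ++ (pvRecB lst (3 - c)).1, csv ++ (pvRecB lst (3 - c)).2) := by
  induction lst generalizing mi csv c with
  | nil => simp [pvLoopA, pvRecB]
  | cons m rest ih =>
    cases hid : pvTruthy m "id" with
    | false =>
      simp only [pvLoopA, hid, Bool.false_and, if_false, Bool.false_eq_true]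
      rw [ih, show pvRecB (m :: rest) (3 - c) = pvRecB rest (3 - c) from by
        simp [pvRecB, hid]]
    | true =>
      by_cases hc : c < 3
      · have hq : 0 < 3 - c := by omega
        have hq' : 3 - (c + 1) = 3 - c - 1 := by omega
        rw [show pvLoopA (m :: rest) mi csv c =
              pvLoopA rest
                (mi ++ "<b>id:</b>" ++ pvIdOf m ++ "    <b>email:</b>" ++ pvEmailOf m ++ "<br>")
                (csv ++ "id:" ++ pvIdOf m ++ "    email:" ++ pvEmailOf m ++ "\n") (c + 1)
            from by simp [pvLoopA, hid, hc]]
        rw [ih, hq',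
          show pvRecB (m :: rest) (3 - c) =
            ("<b>id:</b>" ++ pvIdOf m ++ "    <b>email:</b>" ++ pvEmailOf m ++ "<br>"
              ++ (pvRecB rest (3 - c - 1)).1,
             "id:" ++ pvIdOf m ++ "    email:" ++ pvEmailOf m ++ "\n" ++ (pvRecB rest (3 - c - 1)).2)
          from by simp [pvRecB, hid, hq]]
        simp [String.append_assoc]
      · have h0 : 3 - c = 0 := by omega
        rw [show pvLoopA (m :: rest) mi csv c =
              pvLoopA rest mi (csv ++ "id:" ++ pvIdOf m ++ "    email:" ++ pvEmailOf m ++ "\n") c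
            from by simp [pvLoopA, hid, hc]]
        rw [ih, h0,
          show pvRecB (m :: rest) 0 =
            ("" ++ (pvRecB rest 0).1,
             "id:" ++ pvIdOf m ++ "    email:" ++ pvEmailOf m ++ "\n" ++ (pvRecB rest 0).2)
          from by simp [pvRecB, hid]]
        simp [String.append_assoc]

-- ===== VERDICT =====
theorem get_maintainers_py_spec : Claim_equal_get_maintainers_py := by
  intro rd key er _ _
  show _ = _
  rw [get_maintainers_py, pvLoopA_eq_recB]
  simp [get_maintainers_py_alt]
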